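-- pv_equiv track=rewrite | github.com/yindaheng98/wordatach | test/Functions.py | select_valid_wordids
-- ===== SOURCE A (Python) =====
-- def select_valid_wordids(word_list, word_count_maxs):
--     """从word_list中读取指定数量的高频词用于验证，word_count_maxs[i]指示了要读多少个(i+1)字词"""
--     valid_words = []  #读取的词表
--     word_count = [0] * len(word_count_maxs)  #当前已读数目
--     for i, word in enumerate(word_list):
--         word_length = len(word)
--         if word_count[word_length] < word_count_maxs[word_length]:  #如果这个词长的词没读够
--             word_count[word_length] += 1
--             valid_words.append(i)  #就接着读
--     return valid_words
-- ===== SOURCE B (Python) =====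
-- def select_valid_wordids(word_list, word_count_maxs):
--     # Build an index: word length -> list of positions in appearance order,
--     # then take each length's quota from the front of its bucket and sort.
--     buckets = {}
--     for i, word in enumerate(word_list):
--         buckets.setdefault(len(word), []).append(i)
--     selected = []
--     for length, positions in buckets.items():
--         selected.extend(positions[:max(0, word_count_maxs[length])])
--     return sorted(selected)
-- ===== Notes on version B (the rewrite author's own statement) =====
-- stated objective: alternative
-- what changed: Replaces the single pass with a mutable per-length counter array by building a length->positions index in one pass, taking each length's quota from the front of its bucket, and sorting the selected positions.
import Mathlib
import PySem

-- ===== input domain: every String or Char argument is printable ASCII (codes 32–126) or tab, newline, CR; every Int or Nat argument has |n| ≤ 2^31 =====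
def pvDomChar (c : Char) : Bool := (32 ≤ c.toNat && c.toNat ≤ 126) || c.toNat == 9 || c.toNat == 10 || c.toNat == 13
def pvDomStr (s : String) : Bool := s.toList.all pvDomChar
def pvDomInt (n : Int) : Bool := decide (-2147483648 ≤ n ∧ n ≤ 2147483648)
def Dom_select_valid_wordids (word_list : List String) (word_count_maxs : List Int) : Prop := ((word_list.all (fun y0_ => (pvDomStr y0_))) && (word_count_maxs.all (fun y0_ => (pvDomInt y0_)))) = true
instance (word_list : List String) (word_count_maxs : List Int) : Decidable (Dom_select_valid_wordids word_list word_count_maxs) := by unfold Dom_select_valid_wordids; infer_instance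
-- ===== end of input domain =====

-- B builds a length->positions index, takes each length's quota from the front of its bucket and sorts; same return value as A on Pre_.

-- ===== PORT A =====
-- counter update uses .set wlen.toNat: wlen is a string length, hence never negative, so this is exact
def select_valid_wordids (word_list : List String) (word_count_maxs : List Int) : List Int :=
  ((PySem.List.enumerate word_list 0).foldl
    (fun (st : List Int × List Int) (p : Int × String) =>
      let wlen : Int := PySem.Str.len p.2
      if (PySem.List.pyGet? st.2 wlen).getD 0 < (PySem.List.pyGet? word_count_maxs wlen).getD 0 then
        (st.1 ++ [p.1], st.2.set wlen.toNat ((PySem.List.pyGet? st.2 wlen).getD 0 + 1))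
      else st)
    ([], List.replicate word_count_maxs.length (0 : Int))).1

-- ===== PORT B =====
def select_valid_wordids_alt (word_list : List String) (word_count_maxs : List Int) : List Int :=
  let buckets : PySem.Dict Int (List Int) :=
    (PySem.List.enumerate word_list 0).foldl
      (fun d p => d.modify (PySem.Str.len p.2) [] (fun ps => ps ++ [p.1])) PySem.Dict.empty
  let selected : List Int :=
    buckets.items.foldl
      (fun acc kv =>
        acc ++ PySem.List.slice kv.2 none
          (some (max 0 ((PySem.List.pyGet? word_count_maxs kv.1).getD 0)))) []
  PySem.List.sorted selected (fun x => x) false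

-- ===== PRECONDITION & SPEC =====
-- Pre_ excludes exactly the inputs on which A raises IndexError: a word whose length is ≥ len(word_count_maxs)
def Pre_select_valid_wordids (word_list : List String) (word_count_maxs : List Int) : Prop :=
  ∀ w ∈ word_list, PySem.Str.len w < (word_count_maxs.length : Int)
instance (word_list : List String) (word_count_maxs : List Int) : Decidable (Pre_select_valid_wordids word_list word_count_maxs) := by unfold Pre_select_valid_wordids; infer_instance
def pvWitness_select_valid_wordids : List String × List Int := (["a", "bb", "c", ""], [1, 1, 2])

def Spec_select_valid_wordids (word_list : List String) (word_count_maxs : List Int) (out : List Int) : Prop := out = select_valid_wordids_alt word_list word_count_maxs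
instance (word_list : List String) (word_count_maxs : List Int) (out : List Int) : Decidable (Spec_select_valid_wordids word_list word_count_maxs out) := by unfold Spec_select_valid_wordids; infer_instance

-- ===== CLAIM (what is proved, stated in full; the proofs are below) =====
def Claim_equal_select_valid_wordids : Prop := ∀ (word_list : List String) (word_count_maxs : List Int), Dom_select_valid_wordids word_list word_count_maxs → Pre_select_valid_wordids word_list word_count_maxs → Spec_select_valid_wordids word_list word_count_maxs (select_valid_wordids word_list word_count_maxs)

-- ===== LEMMAS AND PROOFS =====

-- quota for a word length (under Pre_ the index is always in range)
def pvQu (maxs : List Int) (l : Int) : Int := (PySem.List.pyGet? maxs l).getD 0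

-- canonical selection: process pairs (index, word) left to right, occ counts words of each length seen so far
def pvSel (maxs : List Int) : List (Int × String) → (Int → Int) → List Int
  | [], _ => []
  | p :: ps, occ =>
    (if occ (PySem.Str.len p.2) < pvQu maxs (PySem.Str.len p.2) then [p.1] else []) ++
      pvSel maxs ps (fun m => if m = PySem.Str.len p.2 then occ (PySem.Str.len p.2) + 1 else occ m)

theorem pvSel_congr (maxs : List Int) (ps : List (Int × String)) (o1 o2 : Int → Int)
    (h : ∀ p ∈ ps, o1 (PySem.Str.len p.2) = o2 (PySem.Str.len p.2)) :
    pvSel maxs ps o1 = pvSel maxs ps o2 := by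
  induction ps generalizing o1 o2 with
  | nil => rfl
  | cons p ps ih =>
    have hp := h p (by simp)
    simp only [pvSel, hp]
    congr 1
    apply ih
    intro q hq
    have hq2 := h q (by simp [hq])
    split_ifs with hl
    · rfl
    · simpa using hq2

theorem pvSel_sublist (maxs : List Int) (ps : List (Int × String)) (occ : Int → Int) :
    (pvSel maxs ps occ).Sublist (ps.map (·.1)) := by
  induction ps generalizing occ with
  | nil => simp [pvSel]
  | cons p ps ih =>
    simp only [pvSel, List.map_cons]
    split
    · exact List.Sublist.cons₂ _ (ih _)
    · exact List.Sublist.cons _ (ih _)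

theorem pvSel_const (maxs : List Int) (l : Int) (ps : List (Int × String)) (occ : Int → Int)
    (h : ∀ p ∈ ps, PySem.Str.len p.2 = l) :
    pvSel maxs ps occ = (ps.map (·.1)).take (pvQu maxs l - occ l).toNat := by
  induction ps generalizing occ with
  | nil => simp [pvSel]
  | cons p ps ih =>
    have hp : PySem.Str.len p.2 = l := h p (by simp)
    have hrec := ih (fun m => if m = PySem.Str.len p.2 then occ (PySem.Str.len p.2) + 1 else occ m)
      (fun q hq => h q (by simp [hq]))
    simp only [pvSel]
    rw [hrec]
    simp only [hp, List.map_cons]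
    split_ifs with hlt
    · have hn : (pvQu maxs l - occ l).toNat = (pvQu maxs l - (occ l + 1)).toNat + 1 := by omega
      simp [hn]
    · have h0 : (pvQu maxs l - occ l).toNat = 0 := by omega
      have h1 : (pvQu maxs l - (occ l + 1)).toNat = 0 := by omega
      simp [h0, h1]

theorem pvSel_split_perm (maxs : List Int) (l : Int) (ps : List (Int × String)) (occ : Int → Int) :
    (pvSel maxs ps occ).Perm
      (pvSel maxs (ps.filter (fun p => PySem.Str.len p.2 == l)) occ ++
       pvSel maxs (ps.filter (fun p => PySem.Str.len p.2 != l)) occ) := by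
  induction ps generalizing occ with
  | nil => simp [pvSel]
  | cons p ps ih =>
    have hcong : ∀ (zs : List (Int × String)), (∀ q ∈ zs, PySem.Str.len q.2 ≠ PySem.Str.len p.2) →
        pvSel maxs zs (fun m => if m = PySem.Str.len p.2 then occ (PySem.Str.len p.2) + 1 else occ m)
          = pvSel maxs zs occ := by
      intro zs hz
      apply pvSel_congr
      intro q hq
      exact if_neg (hz q hq)
    by_cases hl : PySem.Str.len p.2 = l
    · subst hl
      have hY := hcong (ps.filter (fun q => PySem.Str.len q.2 != PySem.Str.len p.2))
        (fun q hq => by simpa using (List.of_mem_filter hq))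
      simp only [pvSel, List.filter_cons, beq_self_eq_true, bne_self_eq_false, ite_true, ite_false,
        Bool.false_eq_true, if_true, if_false]
      rw [List.append_assoc]
      exact List.Perm.append_left _ ((ih _).trans (by rw [hY]))
    · have hbeq : (PySem.Str.len p.2 == l) = false := by simpa using hl
      have hbne : (PySem.Str.len p.2 != l) = true := by simpa using hl
      have hX := hcong (ps.filter (fun q => PySem.Str.len q.2 == l))
        (fun q hq => by
          have h1 : PySem.Str.len q.2 = l := by simpa using (List.of_mem_filter hq)
          rw [h1]; exact fun h2 => hl h2.symm)
      simp only [pvSel, List.filter_cons, hbeq, hbne, Bool.false_eq_true, if_true, if_false,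
        ite_true, ite_false]
      have h1 := (ih (fun m => if m = PySem.Str.len p.2 then occ (PySem.Str.len p.2) + 1 else occ m))
      rw [hX] at h1
      refine ((List.Perm.append_left _ h1).trans ?_)
      rw [← List.append_assoc, ← List.append_assoc]
      exact List.Perm.append_right _ List.perm_append_comm

theorem pvSel_flatMap_perm (maxs : List Int) (keys : List Int) (ps : List (Int × String)) (occ : Int → Int)
    (hnd : keys.Nodup) (hk : ∀ p ∈ ps, PySem.Str.len p.2 ∈ keys) :
    (pvSel maxs ps occ).Perm
      (keys.flatMap (fun l => pvSel maxs (ps.filter (fun p => PySem.Str.len p.2 == l)) occ)) := by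
  induction keys generalizing ps with
  | nil =>
    cases ps with
    | nil => simp [pvSel]
    | cons p ps => exact absurd (hk p (by simp)) (by simp)
  | cons l keys ih =>
    rcases List.nodup_cons.mp hnd with ⟨hln, hndk⟩
    have hps' : ∀ q ∈ ps.filter (fun p => PySem.Str.len p.2 != l), PySem.Str.len q.2 ∈ keys := by
      intro q hq
      have h1 : PySem.Str.len q.2 ≠ l := by simpa using List.of_mem_filter hq
      have h2 := hk q (List.mem_of_mem_filter hq)
      rcases List.mem_cons.mp h2 with h | h
      · exact absurd h h1
      · exact h
    have hih := ih (ps.filter (fun p => PySem.Str.len p.2 != l)) hndk hps'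
    have hfix : ∀ l' ∈ keys,
        (ps.filter (fun p => PySem.Str.len p.2 != l)).filter (fun p => PySem.Str.len p.2 == l')
          = ps.filter (fun p => PySem.Str.len p.2 == l') := by
      intro l' hl'
      rw [List.filter_filter]
      apply List.filter_congr
      intro q hq
      by_cases h : PySem.Str.len q.2 = l'
      · have hne : PySem.Str.len q.2 ≠ l := by rw [h]; exact fun hh => hln (hh ▸ hl')
        rw [h] at hne ⊢
        rw [bne_iff_ne.mpr hne, beq_self_eq_true, Bool.and_true]
      · rw [beq_eq_false_iff_ne.mpr h, Bool.false_and]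
    have hmapeq :
        keys.flatMap (fun l' => pvSel maxs ((ps.filter (fun p => PySem.Str.len p.2 != l)).filter (fun p => PySem.Str.len p.2 == l')) occ)
          = keys.flatMap (fun l' => pvSel maxs (ps.filter (fun p => PySem.Str.len p.2 == l')) occ) := by
      simp only [List.flatMap]
      congr 1
      exact List.map_congr_left (fun l' hl' => by rw [hfix l' hl'])
    rw [List.flatMap_cons]
    refine (pvSel_split_perm maxs l ps occ).trans (List.Perm.append_left _ ?_)
    exact hih.trans (by rw [hmapeq])

theorem pvA_fold (maxs : List Int) (ps : List (Int × String)) (occ : Int → Int)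
    (acc wc : List Int)
    (hlen : wc.length = maxs.length)
    (hocc : ∀ l : Int, 0 ≤ occ l)
    (hinv : ∀ l : Int, 0 ≤ l → l < (maxs.length : Int) →
      (PySem.List.pyGet? wc l).getD 0 = min (occ l) (max 0 (pvQu maxs l)))
    (hpre : ∀ p ∈ ps, PySem.Str.len p.2 < (maxs.length : Int)) :
    (ps.foldl
      (fun (st : List Int × List Int) (p : Int × String) =>
        let wlen : Int := PySem.Str.len p.2
        if (PySem.List.pyGet? st.2 wlen).getD 0 < (PySem.List.pyGet? maxs wlen).getD 0 then
          (st.1 ++ [p.1], st.2.set wlen.toNat ((PySem.List.pyGet? st.2 wlen).getD 0 + 1))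
        else st)
      (acc, wc)).1 = acc ++ pvSel maxs ps occ := by
  induction ps generalizing occ acc wc with
  | nil => simp [pvSel]
  | cons p ps ih =>
    have hL0 : (0 : Int) ≤ PySem.Str.len p.2 := by simp
    have hLlt : PySem.Str.len p.2 < (maxs.length : Int) := hpre p (by simp)
    have hwcL := hinv (PySem.Str.len p.2) hL0 hLlt
    simp only [List.foldl_cons]
    by_cases hc : occ (PySem.Str.len p.2) < pvQu maxs (PySem.Str.len p.2)
    · have hcond : (PySem.List.pyGet? wc (PySem.Str.len p.2)).getD 0
          < (PySem.List.pyGet? maxs (PySem.Str.len p.2)).getD 0 := by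
        rw [hwcL]
        have := hocc (PySem.Str.len p.2)
        have hq : (PySem.List.pyGet? maxs (PySem.Str.len p.2)).getD 0 = pvQu maxs (PySem.Str.len p.2) := rfl
        omega
      rw [if_pos hcond]
      rw [ih (fun m => if m = PySem.Str.len p.2 then occ (PySem.Str.len p.2) + 1 else occ m)
        (acc ++ [p.1]) _ (by simpa using hlen)
        (by intro m; have h1 := hocc m; have h2 := hocc (PySem.Str.len p.2); dsimp only; split_ifs <;> omega)
        ?_ (fun q hq => hpre q (by simp [hq]))]
      · simp only [pvSel]
        rw [if_pos hc]
        simp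
      · intro m hm0 hmlt
        by_cases hmL : m = PySem.Str.len p.2
        · rw [hmL, PySem.List.pyGet?_of_nonneg _ hL0,
            List.getElem?_set_self (show (PySem.Str.len p.2).toNat < wc.length by omega)]
          simp only [Option.getD_some, if_true]
          rw [hwcL]
          have := hocc (PySem.Str.len p.2)
          omega
        · rw [PySem.List.pyGet?_of_nonneg _ hm0,
            List.getElem?_set_ne (show (PySem.Str.len p.2).toNat ≠ m.toNat by omega)]
          rw [← PySem.List.pyGet?_of_nonneg _ hm0, hinv m hm0 hmlt]
          dsimp only
          rw [if_neg hmL]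
    · have hcond : ¬ ((PySem.List.pyGet? wc (PySem.Str.len p.2)).getD 0
          < (PySem.List.pyGet? maxs (PySem.Str.len p.2)).getD 0) := by
        rw [hwcL]
        have := hocc (PySem.Str.len p.2)
        have hq : (PySem.List.pyGet? maxs (PySem.Str.len p.2)).getD 0 = pvQu maxs (PySem.Str.len p.2) := rfl
        omega
      rw [if_neg hcond]
      rw [ih (fun m => if m = PySem.Str.len p.2 then occ (PySem.Str.len p.2) + 1 else occ m)
        acc wc hlen
        (by intro m; have h1 := hocc m; have h2 := hocc (PySem.Str.len p.2); dsimp only; split_ifs <;> omega)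
        ?_ (fun q hq => hpre q (by simp [hq]))]
      · simp only [pvSel]
        rw [if_neg hc]
        simp
      · intro m hm0 hmlt
        rw [hinv m hm0 hmlt]
        dsimp only
        by_cases hmL : m = PySem.Str.len p.2
        · rw [hmL]
          rw [if_pos rfl]
          have h1 := hocc (PySem.Str.len p.2)
          have h2 := hc
          omega
        · rw [if_neg hmL]

-- A's loop computes the canonical selection pvSel
theorem pvA_eq_pvSel (word_list : List String) (maxs : List Int)
    (hpre : ∀ w ∈ word_list, PySem.Str.len w < (maxs.length : Int)) :
    select_valid_wordids word_list maxs
      = pvSel maxs (PySem.List.enumerate word_list 0) (fun _ => 0) := by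
  have hpre' : ∀ p ∈ PySem.List.enumerate word_list 0, PySem.Str.len p.2 < (maxs.length : Int) := by
    intro p hp
    rcases (PySem.List.mem_enumerate_iff _ _ _).mp hp with ⟨k, hk, rfl⟩
    exact hpre _ (List.getElem_mem hk)
  unfold select_valid_wordids
  rw [pvA_fold maxs (PySem.List.enumerate word_list 0) (fun _ => 0) []
    (List.replicate maxs.length 0) (by simp) (fun _ => le_refl 0) ?_ hpre']
  · simp
  · intro l hl0 hllt
    rw [PySem.List.pyGet?_of_nonneg _ hl0, List.getElem?_replicate]
    have hlt : l.toNat < maxs.length := by omega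
    simp [hlt]

-- B's bucket-then-select output is the canonical selection up to permutation
theorem pvB_eq_sorted (word_list : List String) (maxs : List Int) :
    select_valid_wordids_alt word_list maxs
      = pvSel maxs (PySem.List.enumerate word_list 0) (fun _ => 0) := by
  have hfold :
      (PySem.List.enumerate word_list 0).foldl
        (fun (d : PySem.Dict Int (List Int)) p => d.modify (PySem.Str.len p.2) [] (fun zs => zs ++ [p.1]))
        PySem.Dict.empty
      = ((PySem.List.enumerate word_list 0).map (fun p => (PySem.Str.len p.2, p.1))).foldl
        (fun (d : PySem.Dict Int (List Int)) q => d.modify q.1 [] (fun zs => zs ++ [q.2]))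
        PySem.Dict.empty := by
    rw [List.foldl_map]
  unfold select_valid_wordids_alt
  show PySem.List.sorted
      ((((PySem.List.enumerate word_list 0).foldl
          (fun (d : PySem.Dict Int (List Int)) p => d.modify (PySem.Str.len p.2) [] (fun zs => zs ++ [p.1]))
          PySem.Dict.empty).items).foldl
        (fun acc kv => acc ++ PySem.List.slice kv.2 none (some (max 0 ((PySem.List.pyGet? maxs kv.1).getD 0)))) [])
      (fun x => x) false
    = pvSel maxs (PySem.List.enumerate word_list 0) (fun _ => 0)
  rw [hfold]
  set l2 := (PySem.List.enumerate word_list 0).map (fun p => (PySem.Str.len p.2, p.1)) with hl2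
  set bk := l2.foldl (fun (d : PySem.Dict Int (List Int)) q => d.modify q.1 [] (fun zs => zs ++ [q.2]))
    PySem.Dict.empty with hbk
  have hnd : bk.keys.Nodup := by
    rw [hbk]
    exact PySem.Dict.nodup_keys_foldl_modify_key l2 (fun q => q.1) [] (fun _ q zs => zs ++ [q.2])
      PySem.Dict.empty (by simp [PySem.Dict.keys_empty])
  have hkeys : bk.keys = PySem.Set.ofList (l2.map (·.1)) := by
    rw [hbk, PySem.Dict.keys_foldl_modify_key, PySem.Dict.keys_empty, PySem.Set.update_nil_left]
  have hbucket : ∀ k : Int, bk.getD k []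
      = ((PySem.List.enumerate word_list 0).filter (fun p => PySem.Str.len p.2 == k)).map (·.1) := by
    intro k
    rw [hbk, PySem.Dict.getD_foldl_modify_append, PySem.Dict.getD_empty]
    rw [hl2, List.filter_map, List.map_map]
    rfl
  have hitems : bk.items = bk.keys.map (fun k => (k, bk.getD k [])) :=
    PySem.Dict.items_eq_map_keys bk hnd []
  rw [PySem.List.foldl_append_eq_flatMap, List.nil_append, hitems, List.flatMap_map]
  dsimp only
  have hcover : ∀ p ∈ PySem.List.enumerate word_list 0, PySem.Str.len p.2 ∈ bk.keys := by
    intro p hp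
    rw [hkeys]
    rw [PySem.Set.mem_ofList]
    rw [hl2, List.map_map]
    exact List.mem_map.mpr ⟨p, hp, rfl⟩
  have hperm := pvSel_flatMap_perm maxs bk.keys (PySem.List.enumerate word_list 0) (fun _ => 0)
    hnd hcover
  have hflat : bk.keys.flatMap
        (fun k =>
          PySem.List.slice (bk.getD k []) none (some (max 0 ((PySem.List.pyGet? maxs k).getD 0))))
      = bk.keys.flatMap
        (fun k => pvSel maxs ((PySem.List.enumerate word_list 0).filter (fun p => PySem.Str.len p.2 == k)) (fun _ => 0)) := by
    simp only [List.flatMap]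
    congr 1
    apply List.map_congr_left
    intro k _
    rw [hbucket k, PySem.List.slice_to _ (by omega : (0:Int) ≤ max 0 ((PySem.List.pyGet? maxs k).getD 0))]
    rw [pvSel_const maxs k _ (fun _ => 0)
      (fun q hq => by simpa using List.of_mem_filter hq)]
    have : (max 0 ((PySem.List.pyGet? maxs k).getD 0)).toNat = (pvQu maxs k - 0).toNat := by
      have : pvQu maxs k = (PySem.List.pyGet? maxs k).getD 0 := rfl
      omega
    rw [this]
  rw [hflat]
  have hpw : (pvSel maxs (PySem.List.enumerate word_list 0) (fun _ => 0)).Pairwise (· < ·) := by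
    have hpw0 : ((PySem.List.enumerate word_list 0).map (·.1)).Pairwise (· < ·) :=
      List.pairwise_map.mpr (PySem.List.pairwise_lt_enumerate word_list 0)
    exact hpw0.sublist (pvSel_sublist maxs (PySem.List.enumerate word_list 0) (fun _ => 0))
  exact PySem.List.sorted_eq_of_perm_of_pairwise_lt _ _ _ hperm hpw

-- ===== VERDICT (by name: the statement is the Claim_ definition above) =====
theorem select_valid_wordids_spec : Claim_equal_select_valid_wordids := by
  intro word_list word_count_maxs _ hpre
  show select_valid_wordids word_list word_count_maxs
      = select_valid_wordids_alt word_list word_count_maxs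
  rw [pvA_eq_pvSel word_list word_count_maxs hpre, pvB_eq_sorted word_list word_count_maxs]
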